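-- pv_equiv track=rewrite | github.com/jeKnowledge/arbitrium | app.py | get_most_voted
-- ===== SOURCE A (Python) =====
-- def get_most_voted(options):
--     maximum_votes = 1
--     most_voted_options = []
--     for i in range(len(options)):
--         if options[i] > maximum_votes:
--             maximum_votes = options[i]
--             most_voted_options = [i]
--         elif options[i] == maximum_votes:
--             most_voted_options.append(i)
--     return most_voted_options
-- ===== SOURCE B (Python) =====
-- def get_most_voted(options):
--     if not options:
--         return []
--     m = max(options)
--     if m < 1:
--         return []
--     return [i for i, v in enumerate(options) if v == m]
-- ===== Notes on version B (the rewrite author's own statement) =====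
-- stated objective: simpler
-- what changed: Replaces A's single online pass that tracks a running maximum (floored at 1) and resets/extends the index list with a max-reduction followed by a separate index-filtering comprehension, guarded by m >= 1.
import Mathlib
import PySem

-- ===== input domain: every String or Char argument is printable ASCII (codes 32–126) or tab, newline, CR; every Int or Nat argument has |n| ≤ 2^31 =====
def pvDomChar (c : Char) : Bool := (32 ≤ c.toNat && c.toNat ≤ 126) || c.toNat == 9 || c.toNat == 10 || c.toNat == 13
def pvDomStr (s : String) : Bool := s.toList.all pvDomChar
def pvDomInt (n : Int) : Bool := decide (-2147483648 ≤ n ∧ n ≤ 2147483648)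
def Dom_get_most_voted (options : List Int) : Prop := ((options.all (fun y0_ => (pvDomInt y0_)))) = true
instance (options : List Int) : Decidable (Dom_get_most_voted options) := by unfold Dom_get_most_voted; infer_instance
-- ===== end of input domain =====

-- B replaces A's single online running-max pass (floored at 1) by a max-reduction then an index filter: simpler decomposition, same O(n).


-- ===== PORT A =====
-- literal port of A: loop over range(len(options)), state (maximum_votes, most_voted_options)
def get_most_voted (options : List Int) : List Int :=
  ((PySem.List.pyRange 0 (PySem.List.len options) 1).foldl
    (fun (st : Int × List Int) i =>
      let v := PySem.List.pyGetD options i 0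
      if v > st.1 then (v, [i])
      else if v == st.1 then (st.1, st.2 ++ [i])
      else st)
    (1, [])).2

-- ===== PORT B =====
-- literal port of B: empty → []; m = max(options); m < 1 → []; else indices with v == m
def get_most_voted_alt (options : List Int) : List Int :=
  if options.isEmpty then []
  else
    let m := (PySem.List.max? options (fun y => y)).getD 0
    if m < 1 then []
    else ((PySem.List.enumerate options 0).filter (fun p => p.2 == m)).map (fun p => p.1)

-- ===== PRECONDITION & SPEC =====
def Spec_get_most_voted (options : List Int) (out : List Int) : Prop := out = get_most_voted_alt options
instance (options : List Int) (out : List Int) : Decidable (Spec_get_most_voted options out) := by unfold Spec_get_most_voted; infer_instance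

-- ===== CLAIM (what is proved, stated in full; the proofs are below) =====
def Claim_equal_get_most_voted : Prop := ∀ (options : List Int), Dom_get_most_voted options → Spec_get_most_voted options (get_most_voted options)

-- ===== LEMMAS AND PROOFS =====

-- A's loop body, on (index, value) pairs
def pvStepA (st : Int × List Int) (p : Int × Int) : Int × List Int :=
  if p.2 > st.1 then (p.2, [p.1])
  else if p.2 == st.1 then (st.1, st.2 ++ [p.1])
  else st

-- invariant of A's loop: it computes the running max and the indices of its occurrences
lemma loopA_inv (l : List Int) : ∀ (k m : Int) (acc : List Int),
    (PySem.List.enumerate l k).foldl pvStepA (m, acc) =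
      (l.foldl max m,
       (if l.foldl max m = m then acc else []) ++
         ((PySem.List.enumerate l k).filter (fun p => p.2 == l.foldl max m)).map (fun p => p.1)) := by
  induction l with
  | nil => intro k m acc; simp [PySem.List.enumerate_nil]
  | cons v t ih =>
    intro k m acc
    rw [PySem.List.enumerate_cons]
    simp only [List.foldl_cons, List.filter_cons]
    rcases lt_trichotomy m v with hmv | hmv | hmv
    · have hstep : pvStepA (m, acc) (k, v) = (v, [k]) := by
        simp [pvStepA, hmv]
      have hmx : max m v = v := max_eq_right hmv.le
      rw [hstep, ih]; simp only [hmx]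
      have hle : v ≤ t.foldl max v := (PySem.List.le_foldl_max t v).1
      have hne : t.foldl max v ≠ m := ne_of_gt (lt_of_lt_of_le hmv hle)
      rw [if_neg hne]
      by_cases hv : v = t.foldl max v
      · have hb : (v == t.foldl max v) = true := beq_iff_eq.mpr hv
        rw [if_pos hv.symm]
        simp [hb]
      · have hb : (v == t.foldl max v) = false := by simp [hv]
        rw [if_neg (fun h => hv h.symm)]
        simp [hb]
    · subst hmv
      have hstep : pvStepA (m, acc) (k, m) = (m, acc ++ [k]) := by
        simp [pvStepA]
      rw [hstep, ih]; simp only [max_self]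
      by_cases hM : t.foldl max m = m
      · have hb : (m == t.foldl max m) = true := beq_iff_eq.mpr hM.symm
        rw [if_pos hM, if_pos hM]
        simp [hb]
      · have hb : (m == t.foldl max m) = false := by
          simp only [beq_eq_false_iff_ne, ne_eq]
          exact fun h => hM h.symm
        rw [if_neg hM, if_neg hM]
        simp [hb]
    · have hstep : pvStepA (m, acc) (k, v) = (m, acc) := by
        have h1 : ¬ v > m := not_lt.mpr hmv.le
        have h2 : (v == m) = false := by simp [ne_of_lt hmv]
        simp [pvStepA, h1, h2]
      have hmx : max m v = m := max_eq_left hmv.le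
      rw [hstep, ih]; simp only [hmx]
      have hvne : v ≠ t.foldl max m :=
        ne_of_lt (lt_of_lt_of_le hmv (PySem.List.le_foldl_max t m).1)
      have hb : (v == t.foldl max m) = false := by simp [hvne]
      simp [hb]

-- A on x :: t reduces to index-filtering by the effective maximum max 1 (t.foldl max x)
lemma getA_cons (x : Int) (t : List Int) :
    get_most_voted (x :: t) =
      ((PySem.List.enumerate (x :: t) 0).filter
        (fun p => p.2 == (x :: t).foldl max 1)).map (fun p => p.1) := by
  unfold get_most_voted
  have h := PySem.List.enumerate_eq_map_pyRange (xs := x :: t) (d := 0)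
  have hfold :
      (PySem.List.pyRange 0 (PySem.List.len (x :: t)) 1).foldl
        (fun (st : Int × List Int) i =>
          let v := PySem.List.pyGetD (x :: t) i 0
          if v > st.1 then (v, [i])
          else if v == st.1 then (st.1, st.2 ++ [i])
          else st) (1, []) =
      (PySem.List.enumerate (x :: t) 0).foldl pvStepA (1, []) := by
    rw [h, List.foldl_map]; rfl
  rw [hfold, loopA_inv]
  simp

theorem get_most_voted_spec_aux (options : List Int) :
    get_most_voted options = get_most_voted_alt options := by
  cases options with
  | nil => rfl
  | cons x t =>
    rw [getA_cons]
    unfold get_most_voted_alt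
    simp only [List.isEmpty_cons, Bool.false_eq_true, if_false,
      PySem.List.max?_id_cons, Option.getD_some]
    have hfold1 : (x :: t).foldl max 1 = max 1 (t.foldl max x) := by
      simp only [List.foldl_cons]
      exact List.foldl_assoc
    by_cases hm : t.foldl max x < 1
    · rw [if_pos hm]
      have hM : (x :: t).foldl max 1 = 1 := by
        rw [hfold1]; exact max_eq_left hm.le
      rw [hM]
      have hall : ∀ p ∈ PySem.List.enumerate (x :: t) 0, ¬ ((p.2 : Int) == (1 : Int)) = true := by
        intro p hp
        rcases (PySem.List.mem_enumerate_iff _ _ _).1 hp with ⟨j, hj, rfl⟩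
        have hle : (x :: t)[j] ≤ t.foldl max x := by
          have hmem := List.getElem_mem hj
          rcases List.mem_cons.1 hmem with h | h
          · rw [h]; exact (PySem.List.le_foldl_max t x).1
          · exact (PySem.List.le_foldl_max t x).2 _ h
        simp only [beq_iff_eq]
        intro h; rw [h] at hle
        exact absurd (lt_of_le_of_lt hle hm) (lt_irrefl 1)
      rw [List.filter_eq_nil_iff.mpr hall]
      rfl
    · rw [if_neg hm]
      have hM : (x :: t).foldl max 1 = t.foldl max x := by
        rw [hfold1]; exact max_eq_right (not_lt.mp hm)
      rw [hM]

-- ===== VERDICT (by name: the statement is the Claim_ definition above) =====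
theorem get_most_voted_spec : Claim_equal_get_most_voted := by
  intro options _
  unfold Spec_get_most_voted
  exact get_most_voted_spec_aux options
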